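-- pv_equiv track=rewrite | github.com/sroedger/advent | puzzles/2022_01/main.py | get_inventory
-- ===== SOURCE A (Python) =====
-- from typing import Union
--
-- def get_inventory(data: list[Union[int, None]]) -> list[int]:
--     inventory = []
--     start_index = 0
--     for index, value in enumerate(data):
--         if value is None:
--             subset = data[start_index:index]
--             inventory.append(sum(subset))
--             start_index = index + 1
--     return inventory
-- ===== SOURCE B (Python) =====
-- def get_inventory(data):
--     inventory = []
--     current = 0
--     for value in data:
--         if value is None:
--             inventory.append(current)
--             current = 0
--         else:
--             current += value
--     return inventory
-- ===== Notes on version B (the rewrite author's own statement) =====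
-- stated objective: simpler
-- what changed: B keeps a running integer accumulator per group instead of remembering slice indices, slicing the list and summing each slice; no enumerate, no slice copies, no separate sum pass.
import Mathlib
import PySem

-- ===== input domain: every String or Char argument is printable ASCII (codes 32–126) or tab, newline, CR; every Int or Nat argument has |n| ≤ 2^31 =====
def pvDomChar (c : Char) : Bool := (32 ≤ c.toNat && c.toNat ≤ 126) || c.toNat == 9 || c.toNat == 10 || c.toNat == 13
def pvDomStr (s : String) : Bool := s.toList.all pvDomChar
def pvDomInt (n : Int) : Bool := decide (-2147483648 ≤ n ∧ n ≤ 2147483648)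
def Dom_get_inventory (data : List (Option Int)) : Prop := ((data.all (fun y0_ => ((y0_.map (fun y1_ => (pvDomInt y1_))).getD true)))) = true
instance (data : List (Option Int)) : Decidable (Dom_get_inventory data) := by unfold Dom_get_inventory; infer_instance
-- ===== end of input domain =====

-- B replaces A's slice-index bookkeeping (enumerate + slice + per-group sum) by a single
-- running accumulator per group; objective: simpler.

-- ===== PORT A =====
-- the slice data[start_index:index] never contains None (start_index is set just past each
-- None), so summing it with `x.getD 0` is exact for Python's sum(subset)
def get_inventory (data : List (Option Int)) : List Int :=
  ((PySem.List.enumerate data 0).foldl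
    (fun (st : List Int × Int) iv =>
      if iv.2 = none then
        (st.1 ++ [(PySem.List.slice data (some st.2) (some iv.1)).foldl
                    (fun a x => a + x.getD 0) 0], iv.1 + 1)
      else st) ([], 0)).1

-- ===== PORT B =====
def get_inventory_alt (data : List (Option Int)) : List Int :=
  (data.foldl
    (fun (st : List Int × Int) v =>
      match v with
      | none => (st.1 ++ [st.2], 0)
      | some x => (st.1, st.2 + x)) ([], 0)).1

-- ===== PRECONDITION & SPEC =====
def Spec_get_inventory (data : List (Option Int)) (out : List Int) : Prop := out = get_inventory_alt data
instance (data : List (Option Int)) (out : List Int) : Decidable (Spec_get_inventory data out) := by unfold Spec_get_inventory; infer_instance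

-- ===== CLAIM (what is proved, stated in full; the proofs are below) =====
def Claim_equal_get_inventory : Prop := ∀ (data : List (Option Int)), Dom_get_inventory data → Spec_get_inventory data (get_inventory data)

-- ===== LEMMAS AND PROOFS =====

-- sum of a None-free prefix segment, as A computes it
def pvSeg (full : List (Option Int)) (s i : Nat) : Int :=
  (((full.drop s).take (i - s)).map (fun x => x.getD 0)).sum

theorem pvSum_foldl (l : List (Option Int)) (a : Int) :
    l.foldl (fun a x => a + x.getD 0) a = a + (l.map (fun x => x.getD 0)).sum := by
  induction l generalizing a with
  | nil => simp
  | cons h t ih => simp [List.foldl, ih, add_assoc]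

theorem pv_invariant (full : List (Option Int)) :
    ∀ (rest : List (Option Int)) (i s : Nat) (inv : List Int),
      full.drop i = rest → s ≤ i →
      ((PySem.List.enumerate rest (i : Int)).foldl
        (fun (st : List Int × Int) iv =>
          if iv.2 = none then
            (st.1 ++ [(PySem.List.slice full (some st.2) (some iv.1)).foldl
                        (fun a x => a + x.getD 0) 0], iv.1 + 1)
          else st) (inv, (s : Int))).1
      = (rest.foldl
          (fun (st : List Int × Int) v =>
            match v with
            | none => (st.1 ++ [st.2], 0)
            | some x => (st.1, st.2 + x)) (inv, pvSeg full s i)).1 := by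
  intro rest
  induction rest with
  | nil => intro i s inv _ _; simp [PySem.List.enumerate_nil]
  | cons v rest ih =>
    intro i s inv hdrop hsi
    have hi : i < full.length := by
      by_contra h
      rw [List.drop_eq_nil_of_le (by omega)] at hdrop
      exact (List.cons_ne_nil _ _) hdrop.symm
    have hget : full[i]? = some v := by
      have h : (List.drop i full)[0]? = full[i + 0]? := List.getElem?_drop
      rw [hdrop] at h
      simpa using h.symm
    rw [PySem.List.enumerate_cons]
    cases v with
    | none =>
      simp only [List.foldl_cons, ↓reduceIte]
      have hslice : PySem.List.slice full (some (s : Int)) (some (i : Int))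
          = (full.drop s).take (i - s) := PySem.List.slice_natCast full s i
      have h1 : ((i : Int) + 1) = ((i + 1 : Nat) : Int) := by push_cast; ring
      rw [hslice, pvSum_foldl, h1, ih (i + 1) (i + 1) _ (by have h := congrArg (List.drop 1) hdrop; rw [List.drop_drop] at h; simpa [Nat.add_comm] using h) (le_refl _)]
      simp [pvSeg]
    | some x =>
      simp only [List.foldl_cons]
      have hne : (if (some x : Option Int) = none then
            ((inv, (s : Int)).1 ++ [(PySem.List.slice full (some (inv, (s : Int)).2) (some (i : Int))).foldl
                        (fun a x => a + x.getD 0) 0], (i : Int) + 1)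
          else (inv, (s : Int))) = (inv, (s : Int)) := by simp
      rw [hne]
      have h1 : ((i : Int) + 1) = ((i + 1 : Nat) : Int) := by push_cast; ring
      rw [h1, ih (i + 1) s _ (by have h := congrArg (List.drop 1) hdrop; rw [List.drop_drop] at h; simpa [Nat.add_comm] using h) (by omega)]
      have hseg : pvSeg full s (i + 1) = pvSeg full s i + x := by
        unfold pvSeg
        have h2 : i + 1 - s = (i - s) + 1 := by omega
        rw [h2, List.take_succ]
        have h3 : (full.drop s)[i - s]? = some (some x) := by
          rw [List.getElem?_drop]
          have h4 : s + (i - s) = i := by omega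
          rw [h4, hget]
        simp [h3]
      rw [hseg]

-- ===== VERDICT (by name: the statement is the Claim_ definition above) =====
theorem get_inventory_spec : Claim_equal_get_inventory := by
  intro data _
  unfold Spec_get_inventory get_inventory get_inventory_alt
  have := pv_invariant data data 0 0 [] (by simp) (le_refl _)
  simpa [pvSeg] using this
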